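-- pv_equiv track=rewrite | github.com/anis-rhm/TimeTable-Planning- | core/chromosome.py | _can_move_session
-- ===== SOURCE A (Python) =====
-- def _can_move_session(chromosome, session_key, session_idx, new_day, new_slot):
--     """Check if a session can be moved to a new time slot"""
--     topic, stype = session_key
--     old_session = chromosome[session_key][session_idx]
--     _, _, room, teacher = old_session
--
--     # Check for conflicts with other sessions at the new time
--     new_time_key = (new_day, new_slot)
--
--     for other_sessions in chromosome.values():
--         for (d, s, r, t) in other_sessions:
--             if (d, s) == new_time_key:
--                 if r == room or t == teacher:
--                     return False  # Conflict detected
--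
--     return True
-- ===== SOURCE B (Python) =====
-- def _can_move_session(chromosome, session_key, session_idx, new_day, new_slot):
--     """Group every session into an occupancy index keyed by (day, slot), then
--     answer with a single lookup of the target slot and an all() test."""
--     _, _, room, teacher = chromosome[session_key][session_idx]
--     index = {}
--     for sessions in chromosome.values():
--         for d, s, r, t in sessions:
--             index.setdefault((d, s), []).append((r, t))
--     occupants = index.get((new_day, new_slot), [])
--     return all(r != room and t != teacher for r, t in occupants)
-- ===== Notes on version B (the rewrite author's own statement) =====
-- stated objective: alternative
-- what changed: Replaces A's early-exit conflict scan by building a complete occupancy index (a dict grouping every session's (room, teacher) under its (day, slot) key) and then answering with one dict lookup of the target slot plus an all() test over its occupants.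
import Mathlib
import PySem

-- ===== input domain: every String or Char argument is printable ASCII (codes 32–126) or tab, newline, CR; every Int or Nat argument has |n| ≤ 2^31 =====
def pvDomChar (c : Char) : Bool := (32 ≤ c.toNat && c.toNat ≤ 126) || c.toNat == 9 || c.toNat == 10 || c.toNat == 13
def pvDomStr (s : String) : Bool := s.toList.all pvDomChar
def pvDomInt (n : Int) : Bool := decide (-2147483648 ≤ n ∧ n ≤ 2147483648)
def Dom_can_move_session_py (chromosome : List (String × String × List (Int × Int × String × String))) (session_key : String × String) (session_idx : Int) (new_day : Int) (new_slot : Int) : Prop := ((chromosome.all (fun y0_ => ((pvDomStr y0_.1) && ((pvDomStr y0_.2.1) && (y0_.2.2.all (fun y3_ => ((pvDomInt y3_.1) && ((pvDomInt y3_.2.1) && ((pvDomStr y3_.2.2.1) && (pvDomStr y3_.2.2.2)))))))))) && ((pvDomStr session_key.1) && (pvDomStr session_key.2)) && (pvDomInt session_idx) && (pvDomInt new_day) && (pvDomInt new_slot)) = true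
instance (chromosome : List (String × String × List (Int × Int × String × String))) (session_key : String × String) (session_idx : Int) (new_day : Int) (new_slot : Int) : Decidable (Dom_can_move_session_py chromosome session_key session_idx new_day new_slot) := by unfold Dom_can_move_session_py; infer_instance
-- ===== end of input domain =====

-- B replaces A's early-exit conflict scan by building a complete occupancy index keyed by (day, slot)
-- and answering with one lookup of the target key plus an all() test (alternative, same cost).
-- ===== PORT A =====
-- chromosome[session_key]: first association-list entry whose key pair equals session_key (Python dict lookup; none = KeyError)
def pvLookup (chromosome : List (String × String × List (Int × Int × String × String))) (key : String × String) : Option (List (Int × Int × String × String)) :=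
  match chromosome with
  | [] => none
  | (a, b, v) :: rest => if a == key.1 && b == key.2 then some v else pvLookup rest key

def can_move_session_py (chromosome : List (String × String × List (Int × Int × String × String))) (session_key : String × String) (session_idx : Int) (new_day : Int) (new_slot : Int) : Bool :=
  match pvLookup chromosome session_key with
  | none => false  -- KeyError: unreachable under Pre_
  | some sessions =>
    match PySem.List.pyGet? sessions session_idx with
    | none => false  -- IndexError: unreachable under Pre_
    | some old_session =>
      let room := old_session.2.2.1
      let teacher := old_session.2.2.2
      -- for … for …: if (d,s) == new_time_key and (r == room or t == teacher): return False; else True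
      !(chromosome.any fun kv => kv.2.2.any fun e =>
          (e.1 == new_day && e.2.1 == new_slot) && (e.2.2.1 == room || e.2.2.2 == teacher))

-- ===== PORT B =====
def can_move_session_py_alt (chromosome : List (String × String × List (Int × Int × String × String))) (session_key : String × String) (session_idx : Int) (new_day : Int) (new_slot : Int) : Bool :=
  match pvLookup chromosome session_key with
  | none => false  -- KeyError: unreachable under Pre_
  | some sessions =>
    match PySem.List.pyGet? sessions session_idx with
    | none => false  -- IndexError: unreachable under Pre_
    | some old_session =>
      let room := old_session.2.2.1
      let teacher := old_session.2.2.2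
      -- index.setdefault((d, s), []).append((r, t))  ==  modify (d,s) [] (· ++ [(r,t)])
      let index : PySem.Dict (Int × Int) (List (String × String)) :=
        chromosome.foldl
          (fun idx kv => kv.2.2.foldl
            (fun (idx : PySem.Dict (Int × Int) (List (String × String))) e =>
              idx.modify (e.1, e.2.1) [] (· ++ [(e.2.2.1, e.2.2.2)]))
            idx)
          PySem.Dict.empty
      let occupants := index.getD (new_day, new_slot) []
      occupants.all fun rt => !(rt.1 == room) && !(rt.2 == teacher)

-- ===== PRECONDITION & SPEC =====
-- Pre_ excludes exactly the inputs where A raises: KeyError (session_key not in chromosome) or IndexError (session_idx out of range).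
def Pre_can_move_session_py (chromosome : List (String × String × List (Int × Int × String × String))) (session_key : String × String) (session_idx : Int) (new_day : Int) (new_slot : Int) : Prop :=
  (∃ kv ∈ chromosome, kv.1 = session_key.1 ∧ kv.2.1 = session_key.2) ∧
  PySem.Raise.InRange (((chromosome.find? fun kv => kv.1 == session_key.1 && kv.2.1 == session_key.2).map (fun kv => kv.2.2)).getD []).length session_idx
instance (chromosome : List (String × String × List (Int × Int × String × String))) (session_key : String × String) (session_idx : Int) (new_day : Int) (new_slot : Int) : Decidable (Pre_can_move_session_py chromosome session_key session_idx new_day new_slot) := by unfold Pre_can_move_session_py; infer_instance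

def pvWitness_can_move_session_py : (List (String × String × List (Int × Int × String × String))) × (String × String) × Int × Int × Int :=
  ([("math", "lec", [(0, 1, "R1", "T1")])], ("math", "lec"), 0, 0, 1)

def Spec_can_move_session_py (chromosome : List (String × String × List (Int × Int × String × String))) (session_key : String × String) (session_idx : Int) (new_day : Int) (new_slot : Int) (out : Bool) : Prop := out = can_move_session_py_alt chromosome session_key session_idx new_day new_slot
instance (chromosome : List (String × String × List (Int × Int × String × String))) (session_key : String × String) (session_idx : Int) (new_day : Int) (new_slot : Int) (out : Bool) : Decidable (Spec_can_move_session_py chromosome session_key session_idx new_day new_slot out) := by unfold Spec_can_move_session_py; infer_instance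

-- ===== CLAIM =====
def Claim_equal_can_move_session_py : Prop := ∀ (chromosome : List (String × String × List (Int × Int × String × String))) (session_key : String × String) (session_idx : Int) (new_day : Int) (new_slot : Int), Dom_can_move_session_py chromosome session_key session_idx new_day new_slot → Pre_can_move_session_py chromosome session_key session_idx new_day new_slot → Spec_can_move_session_py chromosome session_key session_idx new_day new_slot (can_move_session_py chromosome session_key session_idx new_day new_slot)

-- ===== LEMMAS AND PROOFS =====

-- the nested fold over the dict equals the fold over the flattened session list
theorem pv_foldl_flat {α : Type} (chromosome : List (String × String × List (Int × Int × String × String)))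
    (g : α → (Int × Int × String × String) → α) (a : α) :
    (chromosome.foldl (fun acc kv => kv.2.2.foldl g acc) a) = (chromosome.flatMap (·.2.2)).foldl g a := by
  induction chromosome generalizing a with
  | nil => rfl
  | cons h t ih => simp [List.foldl_append, ih]

-- the grouping fold's bucket at key (nd, ns) is the filtered-and-projected session list
theorem pv_group_bucket (nd ns : Int) :
    ∀ (l : List (Int × Int × String × String)) (d : PySem.Dict (Int × Int) (List (String × String))),
    (l.foldl (fun (idx : PySem.Dict (Int × Int) (List (String × String))) e =>
        idx.modify (e.1, e.2.1) [] (· ++ [(e.2.2.1, e.2.2.2)])) d).getD (nd, ns) []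
      = d.getD (nd, ns) [] ++ (l.filter fun e => e.1 == nd && e.2.1 == ns).map (fun e => (e.2.2.1, e.2.2.2)) := by
  intro l
  induction l with
  | nil => intro d; simp
  | cons e t ih =>
    intro d
    rw [List.foldl_cons, ih, PySem.Dict.getD_modify, List.filter_cons]
    by_cases h : (e.1, e.2.1) = ((nd, ns) : Int × Int)
    · have h1 : (e.1 == nd && e.2.1 == ns) = true := by
        cases h' : e.1 == nd <;> cases h'' : e.2.1 == ns <;> simp_all
      simp [h, h1]
    · have h1 : (e.1 == nd && e.2.1 == ns) = false := by
        by_contra hc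
        exact h (by cases h' : e.1 == nd <;> cases h'' : e.2.1 == ns <;> simp_all [Prod.ext_iff])
      have h2 : ((nd, ns) : Int × Int) ≠ (e.1, e.2.1) := fun he => h he.symm
      simp [h2, h1]

-- ===== VERDICT =====
theorem can_move_session_py_spec : Claim_equal_can_move_session_py := by
  intro chromosome session_key session_idx new_day new_slot _ _
  unfold Spec_can_move_session_py
  unfold can_move_session_py can_move_session_py_alt
  cases pvLookup chromosome session_key with
  | none => rfl
  | some sessions =>
    simp only []
    cases PySem.List.pyGet? sessions session_idx with
    | none => rfl
    | some old_session =>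
      simp only []
      rw [pv_foldl_flat, pv_group_bucket]
      simp [← List.any_flatMap, List.all_eq_not_any_not]
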